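-- pv_equiv track=rewrite | github.com/neurorishika/multi-animal-tracker | src/hydra_suite/classkit/core/store/db.py | _accuracy_columns
-- ===== SOURCE A (Python) =====
-- from typing import Any, Dict, List, Optional, Tuple
--
-- def _accuracy_columns(field_names: List[str]) -> List[str]:
--     """Return candidate accuracy columns sorted by preference."""
--     cols = [
--         c for c in field_names if ("acc" in c.lower()) or ("accuracy" in c.lower())
--     ]
--     return sorted(
--         cols,
--         key=lambda c: (
--             0 if ("top1" in c.lower() and "metrics" in c.lower()) else 1,
--             c.lower(),
--         ),
--     )
-- ===== SOURCE B (Python) =====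
-- from typing import List
--
-- def _accuracy_columns(field_names: List[str]) -> List[str]:
--     """Return candidate accuracy columns sorted by preference."""
--     cols = [c for c in field_names if "acc" in c.lower()]
--     preferred = [c for c in cols if "top1" in c.lower() and "metrics" in c.lower()]
--     rest = [c for c in cols if not ("top1" in c.lower() and "metrics" in c.lower())]
--     return sorted(preferred, key=str.lower) + sorted(rest, key=str.lower)
-- ===== Notes on version B (the rewrite author's own statement) =====
-- stated objective: simpler
-- what changed: Replaces the single sorted() with a composite (bucket, lowercased-name) tuple key by an explicit partition into preferred/rest buckets, each stably sorted by lowercased name alone and concatenated; the redundant 'accuracy' filter clause is dropped since any name containing 'accuracy' contains 'acc'.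
import Mathlib
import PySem

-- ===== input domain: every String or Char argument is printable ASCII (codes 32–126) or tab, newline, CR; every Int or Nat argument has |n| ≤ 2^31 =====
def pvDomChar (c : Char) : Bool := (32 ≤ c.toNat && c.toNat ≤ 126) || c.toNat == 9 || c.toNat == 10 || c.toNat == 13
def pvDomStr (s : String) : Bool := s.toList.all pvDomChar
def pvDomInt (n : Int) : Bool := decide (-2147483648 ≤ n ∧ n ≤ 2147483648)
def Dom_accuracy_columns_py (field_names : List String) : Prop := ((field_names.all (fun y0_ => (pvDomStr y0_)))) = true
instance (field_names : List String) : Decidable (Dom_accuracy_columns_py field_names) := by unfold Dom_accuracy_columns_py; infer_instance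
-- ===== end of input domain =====

-- B replaces the composite tuple-key sort by a partition into two buckets, each stably sorted by lowercased name; objective: simpler.
-- ===== PORT A =====
def accuracy_columns_py (field_names : List String) : List String :=
  let cols := field_names.filter (fun c =>
    PySem.Str.isIn "acc" (PySem.Str.lower c) || PySem.Str.isIn "accuracy" (PySem.Str.lower c))
  PySem.List.sorted2 cols
    (fun c => if PySem.Str.isIn "top1" (PySem.Str.lower c) && PySem.Str.isIn "metrics" (PySem.Str.lower c) then (0 : Int) else 1)
    (fun c => PySem.Str.lower c)

-- ===== PORT B =====
def pvPrefB (c : String) : Bool :=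
  PySem.Str.isIn "top1" (PySem.Str.lower c) && PySem.Str.isIn "metrics" (PySem.Str.lower c)

def accuracy_columns_py_alt (field_names : List String) : List String :=
  let cols := field_names.filter (fun c => PySem.Str.isIn "acc" (PySem.Str.lower c))
  let preferred := cols.filter (fun c => pvPrefB c)
  let rest := cols.filter (fun c => !(pvPrefB c))
  PySem.List.sorted preferred (fun c => PySem.Str.lower c)
    ++ PySem.List.sorted rest (fun c => PySem.Str.lower c)

-- ===== PRECONDITION & SPEC =====
def Spec_accuracy_columns_py (field_names : List String) (out : List String) : Prop := out = accuracy_columns_py_alt field_names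
instance (field_names : List String) (out : List String) : Decidable (Spec_accuracy_columns_py field_names out) := by unfold Spec_accuracy_columns_py; infer_instance

-- ===== CLAIM (what is proved, stated in full; the proofs are below) =====
def Claim_equal_accuracy_columns_py : Prop := ∀ (field_names : List String), Dom_accuracy_columns_py field_names → Spec_accuracy_columns_py field_names (accuracy_columns_py field_names)

-- ===== LEMMAS AND PROOFS =====
theorem pvInsertBy_nil {α : Type} (bef : α → α → Bool) (x : α) :
    PySem.List.insertBy bef x [] = [x] := rfl

theorem pvInsertBy_cons {α : Type} (bef : α → α → Bool) (x y : α) (ys : List α) :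
    PySem.List.insertBy bef x (y :: ys) =
      if bef x y then x :: y :: ys else y :: PySem.List.insertBy bef x ys := rfl

theorem pvInsertBy_congr {α : Type} (bef bef' : α → α → Bool) (x : α) (L : List α)
    (h : ∀ y ∈ L, bef x y = bef' x y) :
    PySem.List.insertBy bef x L = PySem.List.insertBy bef' x L := by
  induction L with
  | nil => rfl
  | cons y ys ih =>
    rw [pvInsertBy_cons, pvInsertBy_cons, h y (by simp),
      ih (fun z hz => h z (by simp [hz]))]

theorem pvInsertBy_append_left {α : Type} (bef : α → α → Bool) (x : α) (L1 L2 : List α)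
    (h : ∀ y ∈ L2, bef x y = true) :
    PySem.List.insertBy bef x (L1 ++ L2) = PySem.List.insertBy bef x L1 ++ L2 := by
  induction L1 with
  | nil =>
    cases L2 with
    | nil => rfl
    | cons z zs => simp [pvInsertBy_cons, pvInsertBy_nil, h z (by simp)]
  | cons y ys ih =>
    simp only [List.cons_append, pvInsertBy_cons]
    by_cases hb : bef x y
    · simp [hb]
    · simp [hb, ih]

theorem pvInsertBy_append_right {α : Type} (bef : α → α → Bool) (x : α) (L1 L2 : List α)
    (h : ∀ y ∈ L1, bef x y = false) :
    PySem.List.insertBy bef x (L1 ++ L2) = L1 ++ PySem.List.insertBy bef x L2 := by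
  induction L1 with
  | nil => rfl
  | cons y ys ih =>
    simp only [List.cons_append, pvInsertBy_cons, h y (by simp)]
    simp [ih (fun z hz => h z (by simp [hz]))]

theorem pvSplitFold {α : Type} (p : α → Bool) (k2 : α → String) (xs : List α) :
    ∀ (accP accR : List α), (∀ y ∈ accP, p y = true) → (∀ y ∈ accR, p y = false) →
    xs.foldl (fun acc x => PySem.List.insertBy
        (fun a b => decide ((if p a then (0 : Int) else 1) < (if p b then (0 : Int) else 1)) ||
          (!decide ((if p b then (0 : Int) else 1) < (if p a then (0 : Int) else 1)) &&
            decide (k2 a < k2 b))) x acc) (accP ++ accR)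
      = (xs.filter p).foldl
          (fun acc x => PySem.List.insertBy (fun a b => decide (k2 a < k2 b)) x acc) accP
        ++ (xs.filter (fun x => !(p x))).foldl
          (fun acc x => PySem.List.insertBy (fun a b => decide (k2 a < k2 b)) x acc) accR := by
  induction xs with
  | nil => intro accP accR _ _; rfl
  | cons x xs ih =>
    intro accP accR hP hR
    by_cases hp : p x = true
    · have hstep : PySem.List.insertBy
          (fun a b => decide ((if p a then (0 : Int) else 1) < (if p b then (0 : Int) else 1)) ||
            (!decide ((if p b then (0 : Int) else 1) < (if p a then (0 : Int) else 1)) &&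
              decide (k2 a < k2 b))) x (accP ++ accR)
          = PySem.List.insertBy (fun a b => decide (k2 a < k2 b)) x accP ++ accR := by
        rw [pvInsertBy_append_left _ _ _ _ (fun y hy => by simp [hp, hR y hy])]
        rw [pvInsertBy_congr _ (fun a b => decide (k2 a < k2 b)) _ _
          (fun y hy => by simp [hp, hP y hy])]
      simp only [List.foldl_cons, hstep, List.filter_cons, hp, Bool.not_true, if_true]
      have := ih (PySem.List.insertBy (fun a b => decide (k2 a < k2 b)) x accP) accR
        (fun y hy => by
          rcases (PySem.List.mem_insertBy _ _ _ _).1 hy with h | h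
          · exact h ▸ hp
          · exact hP y h) hR
      simpa using this
    · have hpf : p x = false := by simpa using hp
      have hstep : PySem.List.insertBy
          (fun a b => decide ((if p a then (0 : Int) else 1) < (if p b then (0 : Int) else 1)) ||
            (!decide ((if p b then (0 : Int) else 1) < (if p a then (0 : Int) else 1)) &&
              decide (k2 a < k2 b))) x (accP ++ accR)
          = accP ++ PySem.List.insertBy (fun a b => decide (k2 a < k2 b)) x accR := by
        rw [pvInsertBy_append_right _ _ _ _ (fun y hy => by simp [hpf, hP y hy])]
        rw [pvInsertBy_congr _ (fun a b => decide (k2 a < k2 b)) _ _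
          (fun y hy => by simp [hpf, hR y hy])]
      simp only [List.foldl_cons, hstep, List.filter_cons, hpf, Bool.not_false]
      have := ih accP (PySem.List.insertBy (fun a b => decide (k2 a < k2 b)) x accR) hP
        (fun y hy => by
          rcases (PySem.List.mem_insertBy _ _ _ _).1 hy with h | h
          · exact h ▸ hpf
          · exact hR y h)
      simpa using this

theorem pvFilter_eq (c : String) :
    (PySem.Str.isIn "acc" (PySem.Str.lower c) || PySem.Str.isIn "accuracy" (PySem.Str.lower c))
      = PySem.Str.isIn "acc" (PySem.Str.lower c) := by
  cases h : PySem.Str.isIn "accuracy" (PySem.Str.lower c) with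
  | false => simp
  | true =>
    have h2 : ("accuracy".toList : List Char) <:+: (PySem.Str.lower c).toList :=
      (PySem.Str.isIn_iff_infix _ _).1 h
    have h1 : ("acc".toList : List Char) <:+: ("accuracy".toList : List Char) := by decide
    have h3 : PySem.Str.isIn "acc" (PySem.Str.lower c) = true :=
      (PySem.Str.isIn_iff_infix _ _).2 (h1.trans h2)
    rw [h3]; rfl

-- ===== VERDICT (by name: the statement is the Claim_ definition above) =====
theorem accuracy_columns_py_spec : Claim_equal_accuracy_columns_py := by
  intro field_names _
  unfold Spec_accuracy_columns_py accuracy_columns_py accuracy_columns_py_alt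
  rw [List.filter_congr (fun c _ => pvFilter_eq c)]
  show PySem.List.sorted2 _ _ _ = _
  unfold PySem.List.sorted2 PySem.List.sorted pvPrefB
  simpa using pvSplitFold
    (fun c => PySem.Str.isIn "top1" (PySem.Str.lower c) && PySem.Str.isIn "metrics" (PySem.Str.lower c))
    (fun c => PySem.Str.lower c)
    (field_names.filter (fun c => PySem.Str.isIn "acc" (PySem.Str.lower c))) [] []
    (by simp) (by simp)
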